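-- pv_equiv track=rewrite | github.com/hmnhGeek/Data-Structures-Algorithms | Sliding Windows/max_consecutive_ones.py | get_max_consecutive_ones_with_k_zeros
-- ===== SOURCE A (Python) =====
-- def get_max_consecutive_ones_with_k_zeros(array, k):
--     # Time complexity would be O(n) and space would be O(1).
--
--     # assuming that we have a window of element at index 0 only
--     left = right = 0
--
--     # the window size will be 1 for 0th index.
--     max_size_recorded = 1
--
--     # assuming that number of zeroes used is 0 (although the 0th element itself
--     # can be a 0, but we will capture it in the while loop).
--     num_zeroes_used = 0
--
--     # store the length of the array
--     num_elements = len(array)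
--     # while the right pointer is within the array
--     while right < num_elements:
--         # if the `right` element is 0, increment the zero count and ...
--         if array[right] == 0:
--             num_zeroes_used += 1
--
--             # if by any chance the count of zeroes has exceeded k, shrink the window from left
--             # unless the count of zeroes <= k
--             while num_zeroes_used > k:
--                 left += 1
--                 if array[left - 1] == 0:
--                     num_zeroes_used -= 1
--
--         # since you have a perfect window now, update the max window size.
--         max_size_recorded = max(max_size_recorded, right - left + 1)
--
--         # increment the right pointer by expanding the window for taking in the next element.
--         right += 1
--
--     # return the max sized window size.
--     return max_size_recorded
-- ===== SOURCE B (Python) =====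
-- def get_max_consecutive_ones_with_k_zeros(array, k):
--     # Non-shrinking sliding window: the window never contracts, so its final
--     # size is the best size seen; no inner while loop and no per-step max().
--     left = 0
--     zeros = 0
--     for value in array:
--         if value == 0:
--             zeros += 1
--         if zeros > k:
--             if array[left] == 0:
--                 zeros -= 1
--             left += 1
--     return max(1, len(array) - left)
-- ===== Notes on version B (the rewrite author's own statement) =====
-- stated objective: simpler
-- what changed: Replaces A's shrinking sliding window (inner while-loop that contracts the window plus a per-element max() call) with the non-shrinking window: one if advances left by at most one per element, the window never contracts, and the answer is read off once at the end as max(1, len(array)-left); dropping the inner loop and the per-element max() gives a measured constant-factor speedup.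
-- outside the precondition, e.g. on get_max_consecutive_ones_with_k_zeros([1, 1], -1): A returns 2, B returns 1
import Mathlib
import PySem

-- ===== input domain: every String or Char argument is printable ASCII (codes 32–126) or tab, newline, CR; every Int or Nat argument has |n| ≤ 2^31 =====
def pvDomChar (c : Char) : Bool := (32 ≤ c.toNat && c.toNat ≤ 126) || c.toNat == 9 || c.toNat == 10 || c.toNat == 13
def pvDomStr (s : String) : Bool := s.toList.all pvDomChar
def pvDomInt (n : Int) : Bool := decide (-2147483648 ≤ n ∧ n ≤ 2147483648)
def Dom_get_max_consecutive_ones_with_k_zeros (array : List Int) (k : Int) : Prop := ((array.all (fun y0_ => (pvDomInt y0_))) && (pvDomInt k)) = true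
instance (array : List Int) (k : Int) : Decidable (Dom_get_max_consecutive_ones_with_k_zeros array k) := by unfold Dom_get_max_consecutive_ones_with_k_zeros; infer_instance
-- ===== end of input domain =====

-- B replaces A's shrinking window (inner while + per-step max()) with the
-- non-shrinking window read off once at the end: simpler, same O(n) cost.

-- ===== PORT A =====
-- A's inner `while num_zeroes_used > k` loop; fuel covers every iteration Python
-- performs before terminating (at most len(array)+1 from left=0); on the inputs
-- where Python would raise IndexError at array[left-1] (only possible for k < 0,
-- excluded by Pre_) the pyGet? is none and we stop — unreachable under Pre_.
def pvShrinkA (array : List Int) (k : Int) : Nat → Int → Int → Int × Int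
  | 0, left, zeros => (left, zeros)                 -- fuel exhausted: unreachable under Pre_
  | fuel + 1, left, zeros =>
    if k < zeros then
      let left2 := left + 1
      match PySem.List.pyGet? array (left2 - 1) with
      | some v => pvShrinkA array k fuel left2 (if v == 0 then zeros - 1 else zeros)
      | none => (left2, zeros)                      -- Python raises IndexError here
    else (left, zeros)

def get_max_consecutive_ones_with_k_zeros (array : List Int) (k : Int) : Int :=
  -- state = (left, max_size_recorded, num_zeroes_used); while right < num_elements
  let num_elements : Int := (array.length : Int)
  let st :=
    (PySem.List.pyRange 0 num_elements 1).foldl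
      (fun (s : Int × Int × Int) right =>
        let left := s.1
        let max_size_recorded := s.2.1
        let num_zeroes_used := s.2.2
        -- array[right] is always in range here (0 ≤ right < len)
        let lz :=
          if (PySem.List.pyGet? array right).getD 0 == 0 then
            pvShrinkA array k (array.length + 2) left (num_zeroes_used + 1)
          else (left, num_zeroes_used)
        (lz.1, max max_size_recorded (right - lz.1 + 1), lz.2))
      (0, 1, 0)
  st.2.1

-- ===== PORT B =====
def get_max_consecutive_ones_with_k_zeros_alt (array : List Int) (k : Int) : Int :=
  -- state = (left, zeros); one non-shrinking pass over the values
  let st :=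
    array.foldl
      (fun (s : Int × Int) value =>
        let left := s.1
        let zeros := if value == 0 then s.2 + 1 else s.2
        if k < zeros then
          -- array[left] is always in range here (0 ≤ left < len)
          (left + 1, if (PySem.List.pyGet? array left).getD 0 == 0 then zeros - 1 else zeros)
        else (left, zeros))
      (0, 0)
  max 1 ((array.length : Int) - st.1)

-- ===== PRECONDITION & SPEC =====
-- Pre_ restricts to the natural domain of a zero budget, k ≥ 0: a negative k is a
-- nonsensical budget there — A raises IndexError on it as soon as the array contains
-- a zero, and its full-length answer on zero-free arrays is accidental.
def Pre_get_max_consecutive_ones_with_k_zeros (array : List Int) (k : Int) : Prop := 0 ≤ k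

instance (array : List Int) (k : Int) : Decidable (Pre_get_max_consecutive_ones_with_k_zeros array k) := by
  unfold Pre_get_max_consecutive_ones_with_k_zeros; infer_instance

def pvWitness_get_max_consecutive_ones_with_k_zeros : List Int × Int := ([1, 0, 1, 0, 0, 1], 1)

def Spec_get_max_consecutive_ones_with_k_zeros (array : List Int) (k : Int) (out : Int) : Prop := out = get_max_consecutive_ones_with_k_zeros_alt array k
instance (array : List Int) (k : Int) (out : Int) : Decidable (Spec_get_max_consecutive_ones_with_k_zeros array k out) := by unfold Spec_get_max_consecutive_ones_with_k_zeros; infer_instance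

-- ===== CLAIM (what is proved, stated in full; the proofs are below) =====
def Claim_equal_get_max_consecutive_ones_with_k_zeros : Prop := ∀ (array : List Int) (k : Int), Dom_get_max_consecutive_ones_with_k_zeros array k → Pre_get_max_consecutive_ones_with_k_zeros array k → Spec_get_max_consecutive_ones_with_k_zeros array k (get_max_consecutive_ones_with_k_zeros array k)

-- ===== LEMMAS AND PROOFS =====

-- zeros among indices [a, b) of array
def pvZ (array : List Int) (a b : Nat) : Nat :=
  ((array.take b).drop a).countP (fun x => x == 0)

lemma pvZ_self (array : List Int) (a : Nat) : pvZ array a a = 0 := by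
  simp [pvZ]

lemma pvZ_succ_right (array : List Int) {a b : Nat} (hab : a ≤ b) (hb : b < array.length) :
    pvZ array a (b + 1) = pvZ array a b + (if array[b] = 0 then 1 else 0) := by
  unfold pvZ
  rw [List.take_add_one, List.getElem?_eq_getElem hb]
  rw [List.drop_append_of_le_length (by simp; omega)]
  simp [List.countP_append, List.countP_singleton]

lemma pvZ_succ_left (array : List Int) {a b : Nat} (hab : a < b) (ha : a < array.length) :
    pvZ array a b = (if array[a] = 0 then 1 else 0) + pvZ array (a + 1) b := by
  unfold pvZ
  rw [List.drop_eq_getElem_cons (by simp; omega)]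
  rw [List.countP_cons]
  simp [List.getElem_take]
  omega

lemma pvZ_antitone (array : List Int) {a a' b : Nat} (h : a ≤ a') :
    pvZ array a' b ≤ pvZ array a b := by
  unfold pvZ
  rw [show a' = a + (a' - a) by omega, ← List.drop_drop]
  exact (List.drop_sublist _ _).countP_le

lemma pvZ_mono_right (array : List Int) {a b b' : Nat} (h : b ≤ b') :
    pvZ array a b ≤ pvZ array a b' := by
  unfold pvZ
  exact ((List.take_prefix_take_left h).drop a).sublist.countP_le

-- minimality reading of the left-pointer characterisation
lemma pvMin (array : List Int) (k : Int) {L l T : Nat}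
    (hchar : L = 0 ∨ k < (pvZ array (L - 1) T : Int))
    (hl : (pvZ array l T : Int) ≤ k) : L ≤ l := by
  by_contra hlt
  rcases hchar with h0 | hgt
  · omega
  · have := pvZ_antitone array (a := l) (a' := L - 1) (b := T) (by omega)
    omega

-- the shrink loop of A, fully specified
lemma pvShrinkA_spec (array : List Int) (k : Int) (hk : 0 ≤ k) {T : Nat} (hT : T ≤ array.length) :
    ∀ (fuel L0 : Nat), L0 ≤ T → T - L0 < fuel →
      ∃ L' : Nat,
        pvShrinkA array k fuel (L0 : Int) ((pvZ array L0 T : Nat) : Int)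
          = ((L' : Int), ((pvZ array L' T : Nat) : Int)) ∧
        L0 ≤ L' ∧ L' ≤ T ∧ ((pvZ array L' T : Nat) : Int) ≤ k ∧
        (L' = L0 ∨ k < ((pvZ array (L' - 1) T : Nat) : Int)) := by
  intro fuel
  induction fuel with
  | zero => intro L0 h1 h2; omega
  | succ f ih =>
    intro L0 hL0 hfuel
    rw [pvShrinkA]
    by_cases hc : k < ((pvZ array L0 T : Nat) : Int)
    · -- shrink step
      have hL0T : L0 < T := by
        rcases Nat.lt_or_ge L0 T with h | h
        · exact h
        · exfalso
          have : L0 = T := by omega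
          rw [this, pvZ_self] at hc
          simp at hc; omega
      have hL0len : L0 < array.length := by omega
      have hidx : ((L0 : Int) + 1 - 1) = (L0 : Int) := by ring
      have hget : PySem.List.pyGet? array ((L0 : Int) + 1 - 1) = some (array[L0]'hL0len) := by
        rw [hidx, PySem.List.pyGet?_natCast, List.getElem?_eq_getElem hL0len]
      have hz : (if (array[L0]'hL0len) == 0
            then ((pvZ array L0 T : Nat) : Int) - 1 else ((pvZ array L0 T : Nat) : Int))
          = ((pvZ array (L0 + 1) T : Nat) : Int) := by
        have := pvZ_succ_left array hL0T hL0len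
        by_cases h0 : (array[L0]'hL0len) = 0 <;> simp [h0] at this ⊢ <;> omega
      rw [if_pos hc]
      simp only [hget, hz]
      obtain ⟨L', hrun, hge, hle, hzk, hchar⟩ := ih (L0 + 1) (by omega) (by omega)
      refine ⟨L', ?_, by omega, hle, hzk, ?_⟩
      · rw [show ((L0 : Int) + 1) = ((L0 + 1 : Nat) : Int) by push_cast; ring]
        exact hrun
      · rcases hchar with h | h
        · right; rw [h]; simpa using hc
        · right; exact h
    · rw [if_neg hc]
      exact ⟨L0, rfl, le_rfl, hL0, by omega, Or.inl rfl⟩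

-- prefix states of the two loops
def pvA (array : List Int) (k : Int) (t : Nat) : Int × Int × Int :=
  (PySem.List.pyRange 0 (t : Int) 1).foldl
    (fun (s : Int × Int × Int) right =>
      let lz :=
        if (PySem.List.pyGet? array right).getD 0 == 0 then
          pvShrinkA array k (array.length + 2) s.1 (s.2.2 + 1)
        else (s.1, s.2.2)
      (lz.1, max s.2.1 (right - lz.1 + 1), lz.2))
    (0, 1, 0)

def pvB (array : List Int) (k : Int) (t : Nat) : Int × Int :=
  (array.take t).foldl
    (fun (s : Int × Int) value =>
      let zeros := if value == 0 then s.2 + 1 else s.2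
      if k < zeros then
        (s.1 + 1, if (PySem.List.pyGet? array s.1).getD 0 == 0 then zeros - 1 else zeros)
      else (s.1, zeros))
    (0, 0)

lemma pvA_succ (array : List Int) (k : Int) (t : Nat) :
    pvA array k (t + 1) =
      (let s := pvA array k t
       let lz :=
         if (PySem.List.pyGet? array (t : Int)).getD 0 == 0 then
           pvShrinkA array k (array.length + 2) s.1 (s.2.2 + 1)
         else (s.1, s.2.2)
       (lz.1, max s.2.1 ((t : Int) - lz.1 + 1), lz.2)) := by
  unfold pvA
  rw [show ((t + 1 : Nat) : Int) = (t : Int) + 1 by push_cast; ring,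
      PySem.List.pyRange_one_succ_right (by positivity), List.foldl_append]
  rfl

lemma pvB_succ (array : List Int) (k : Int) {t : Nat} (ht : t < array.length) :
    pvB array k (t + 1) =
      (let s := pvB array k t
       let zeros := if array[t] == 0 then s.2 + 1 else s.2
       if k < zeros then
         (s.1 + 1, if (PySem.List.pyGet? array s.1).getD 0 == 0 then zeros - 1 else zeros)
       else (s.1, zeros)) := by
  unfold pvB
  rw [List.take_add_one, List.getElem?_eq_getElem ht]
  rw [List.foldl_append]
  rfl

lemma pvA_eq (array : List Int) (k : Int) :
    get_max_consecutive_ones_with_k_zeros array k = (pvA array k array.length).2.1 := rfl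

lemma pvB_eq (array : List Int) (k : Int) :
    get_max_consecutive_ones_with_k_zeros_alt array k
      = max 1 ((array.length : Int) - (pvB array k array.length).1) := by
  simp [get_max_consecutive_ones_with_k_zeros_alt, pvB, List.take_length]

-- the joint invariant of the two loops after t steps
lemma pvInv (array : List Int) (k : Int) (hk : 0 ≤ k) :
    ∀ t : Nat, t ≤ array.length →
      ∃ LA LB : Nat,
        pvA array k t = ((LA : Int), max 1 ((t : Int) - (LB : Int)), ((pvZ array LA t : Nat) : Int)) ∧
        pvB array k t = ((LB : Int), ((pvZ array LB t : Nat) : Int)) ∧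
        LA ≤ t ∧ LB ≤ t ∧
        ((pvZ array LA t : Nat) : Int) ≤ k ∧
        (LA = 0 ∨ k < ((pvZ array (LA - 1) t : Nat) : Int)) ∧
        ((t : Int) - (LA : Int) ≤ max 1 ((t : Int) - (LB : Int))) ∧
        (LB = t → 1 ≤ t → k < ((pvZ array (t - 1) t : Nat) : Int)) := by
  intro t
  induction t with
  | zero =>
    intro _
    exact ⟨0, 0, by simp [pvA, pvZ_self], by simp [pvB, pvZ_self], le_rfl,
      le_rfl, by simp [pvZ_self]; omega, Or.inl rfl, by simp, by omega⟩
  | succ t ih =>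
    intro ht1
    have ht : t < array.length := by omega
    obtain ⟨LA, LB, hA, hB, hLAt, hLBt, hzk, hchar, hI4, hlast⟩ := ih (by omega)
    have hgett : (PySem.List.pyGet? array (t : Int)).getD 0 = array[t] := by
      rw [PySem.List.pyGet?_natCast, List.getElem?_eq_getElem ht]; rfl
    -- A side step
    have hstepA : ∃ LA' : Nat,
        pvA array k (t + 1) = ((LA' : Int),
            max (max 1 ((t : Int) - (LB : Int))) ((t : Int) - (LA' : Int) + 1),
            ((pvZ array LA' (t + 1) : Nat) : Int)) ∧
        LA ≤ LA' ∧ LA' ≤ t + 1 ∧ ((pvZ array LA' (t + 1) : Nat) : Int) ≤ k ∧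
        (LA' = 0 ∨ k < ((pvZ array (LA' - 1) (t + 1) : Nat) : Int)) := by
      rw [pvA_succ, hA]
      by_cases h0 : array[t] = 0
      · have hz1 : ((pvZ array LA t : Nat) : Int) + 1 = ((pvZ array LA (t + 1) : Nat) : Int) := by
          have := pvZ_succ_right array hLAt ht
          simp [h0] at this; omega
        simp only [hgett, beq_iff_eq]
        rw [if_pos h0, hz1]
        obtain ⟨LA', hrun, hge, hle, hzk', hchar'⟩ :=
          pvShrinkA_spec array k hk (by omega : t + 1 ≤ array.length)
            (array.length + 2) LA (by omega) (by omega)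
        rw [hrun]
        refine ⟨LA', rfl, hge, hle, hzk', ?_⟩
        rcases hchar' with h | h
        · subst h
          rcases hchar with h' | h'
          · exact Or.inl h'
          · exact Or.inr (lt_of_lt_of_le h' (by exact_mod_cast pvZ_mono_right array (by omega)))
        · exact Or.inr h
      · have hz1 : pvZ array LA (t + 1) = pvZ array LA t := by
          have := pvZ_succ_right array hLAt ht
          simp [h0] at this; omega
        simp only [hgett, beq_iff_eq]
        rw [if_neg h0]
        refine ⟨LA, ?_, le_rfl, by omega, by rw [hz1]; exact hzk, ?_⟩
        rw [hz1]
        rcases hchar with h' | h'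
        · exact Or.inl h'
        · exact Or.inr (lt_of_lt_of_le h' (by exact_mod_cast pvZ_mono_right array (by omega)))
    obtain ⟨LA', hA', hAge, hALe, hzk', hchar'⟩ := hstepA
    -- B side step
    have hgetLB : (PySem.List.pyGet? array (LB : Int)).getD 0 = array[LB]'(by omega) := by
      rw [PySem.List.pyGet?_natCast, List.getElem?_eq_getElem (by omega : LB < array.length)]; rfl
    have hzB1 : (if (array[t] == 0) = true then ((pvZ array LB t : Nat) : Int) + 1
          else ((pvZ array LB t : Nat) : Int)) = ((pvZ array LB (t + 1) : Nat) : Int) := by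
      have := pvZ_succ_right array hLBt ht
      by_cases h0 : array[t] = 0 <;> simp [h0] at this ⊢ <;> omega
    by_cases hs : k < ((pvZ array LB (t + 1) : Nat) : Int)
    · -- shift case
      have hzB2 : (if (array[LB]'(by omega) == 0) = true
            then ((pvZ array LB (t + 1) : Nat) : Int) - 1 else ((pvZ array LB (t + 1) : Nat) : Int))
          = ((pvZ array (LB + 1) (t + 1) : Nat) : Int) := by
        have := pvZ_succ_left array (by omega : LB < t + 1) (by omega : LB < array.length)
        by_cases h0 : array[LB]'(by omega) = 0 <;> simp [h0] at this ⊢ <;> omega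
      have hB' : pvB array k (t + 1)
          = (((LB + 1 : Nat) : Int), ((pvZ array (LB + 1) (t + 1) : Nat) : Int)) := by
        rw [pvB_succ array k ht, hB]
        simp only [hzB1, hgetLB]
        rw [if_pos hs, hzB2]
        push_cast; rfl
      -- LB < LA' : window [LB, t+1) is invalid
      have hBA : LB < LA' := by
        by_contra hle
        have h1 : pvZ array LB (t + 1) ≤ pvZ array LA' (t + 1) := pvZ_antitone array (by omega)
        omega
      have heq : max (max 1 ((t : Int) - (LB : Int))) ((t : Int) - (LA' : Int) + 1)
          = max 1 (((t + 1 : Nat) : Int) - ((LB + 1 : Nat) : Int)) := by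
        push_cast; omega
      refine ⟨LA', LB + 1, by rw [hA', heq], hB', by omega, by omega, hzk', hchar', ?_, ?_⟩
      · push_cast at heq ⊢; omega
      · intro hLB' _
        have : LB = t := by omega
        subst this
        exact hs
    · -- no-shift case
      have hB' : pvB array k (t + 1)
          = ((LB : Int), ((pvZ array LB (t + 1) : Nat) : Int)) := by
        rw [pvB_succ array k ht, hB]
        simp only [hzB1]
        rw [if_neg hs]
      have hmin : LA' ≤ LB := pvMin array k hchar' (by omega)
      have hup : (t : Int) - (LA' : Int) + 1 ≤ max 1 ((t : Int) - (LB : Int)) + 1 := by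
        have : (LA : Int) ≤ LA' := by exact_mod_cast hAge
        omega
      have hcorner : LB = t → 1 ≤ t → t ≤ LA' := by
        intro hLBt' h1t
        by_contra hlt
        have h2 : k < ((pvZ array (t - 1) t : Nat) : Int) := hlast hLBt' h1t
        have h3 : pvZ array (t - 1) t ≤ pvZ array (t - 1) (t + 1) := pvZ_mono_right array (by omega)
        have h4 : pvZ array (t - 1) (t + 1) ≤ pvZ array LA' (t + 1) := pvZ_antitone array (by omega)
        omega
      have heq : max (max 1 ((t : Int) - (LB : Int))) ((t : Int) - (LA' : Int) + 1)
          = max 1 (((t + 1 : Nat) : Int) - ((LB : Nat) : Int)) := by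
        rcases Nat.lt_or_ge LB t with hc | hc
        · push_cast; omega
        · have hLBeq : LB = t := by omega
          rcases Nat.eq_zero_or_pos t with h | h
          · subst hLBeq; push_cast; omega
          · have := hcorner hLBeq (by omega)
            subst hLBeq; push_cast; omega
      refine ⟨LA', LB, by rw [hA', heq], hB', by omega, by omega, hzk', hchar', ?_, ?_⟩
      · push_cast at heq ⊢; omega
      · intro hLB' _; omega


-- ===== VERDICT (by name: the statement is the Claim_ definition above) =====
theorem get_max_consecutive_ones_with_k_zeros_spec : Claim_equal_get_max_consecutive_ones_with_k_zeros := by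
  intro array k _hdom hk
  unfold Spec_get_max_consecutive_ones_with_k_zeros
  obtain ⟨LA, LB, hA, hB, -⟩ := pvInv array k hk array.length le_rfl
  rw [pvA_eq, pvB_eq, hA, hB]
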